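-- pv_equiv track=rewrite | github.com/zubie7a/Algorithms | CodeSignal/Arcade/The_Core/Level_06_Labyrinth_Of_Nested_Loops/048_Weak_Numbers.py | weakNumbers
-- ===== SOURCE A (Python) =====
-- def weakNumbers(n):
--     # Define the weakness of a given number x as the number of positive
--     # integers smaller than x that have more divisors than x.
--     # Given a number n, what is the weakest number in the range [1, n],
--     # and how many other numbers have this weakness?
--
--     divisors = [2 for _ in range(n + 2)]
--     # One only has 1 divisor. Every other number by default has two,
--     # one and itself.
--     divisors[1] = 1
--     for i in range(2, n + 1):
--         # Check all values up to the number (1-i) non inclusive either.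
--         for j in range(2, i):
--             if i % j == 0:
--                 # Keep adding up divisors.
--                 divisors[i] += 1
--
--     weaknesses = []
--     # Now again for all values...
--     for i in range(1, n + 1):
--         more_divisors = 0
--         # For all other values to its left (non-inclusive)...
--         for j in range(1, i):
--             # Compare the amount of divisors and add up if it has more.
--             if divisors[j] > divisors[i]:
--                 more_divisors += 1
--         # Store the weakness of this value.
--         weaknesses.append(more_divisors)
--
--     # Return the highest weakness value and how many numbers have it too.
--     weakest = max(weaknesses)
--     times = weaknesses.count(weakest)
--     return [weakest, times]
-- ===== SOURCE B (Python) =====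
-- def weakNumbers(n):
--     # Sieve divisor counts in O(n log n): every m counts divisor 1, then each
--     # j >= 2 is added to all of its multiples.
--     cnt = [1] * (n + 1)
--     for j in range(2, n + 1):
--         for m in range(j, n + 1, j):
--             cnt[m] += 1
--     # One left-to-right pass: freq counts divisor-counts seen so far, so the
--     # weakness of i is the total frequency of counts larger than cnt[i];
--     # the running (best, times) pair replaces building the list + max + count.
--     freq = {}
--     best = -1
--     times = 0
--     for i in range(1, n + 1):
--         w = sum(v for c, v in freq.items() if c > cnt[i])
--         if w > best:
--             best = w
--             times = 1
--         elif w == best: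
--             times += 1
--         freq[cnt[i]] = freq.get(cnt[i], 0) + 1
--     return [best, times]
-- ===== Notes on version B (the rewrite author's own statement) =====
-- stated objective: faster
-- what changed: Replaces the O(n^2) trial-division divisor table and the O(n^2) count-of-larger-predecessors pass by a multiples sieve for divisor counts plus a single left-to-right pass over a frequency dictionary of divisor counts, tracking the running (max, count) pair instead of building the weakness list and scanning it with max/count.
-- outside the precondition, e.g. on weakNumbers(0): A raises ValueError, B returns [-1, 0]
import Mathlib
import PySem

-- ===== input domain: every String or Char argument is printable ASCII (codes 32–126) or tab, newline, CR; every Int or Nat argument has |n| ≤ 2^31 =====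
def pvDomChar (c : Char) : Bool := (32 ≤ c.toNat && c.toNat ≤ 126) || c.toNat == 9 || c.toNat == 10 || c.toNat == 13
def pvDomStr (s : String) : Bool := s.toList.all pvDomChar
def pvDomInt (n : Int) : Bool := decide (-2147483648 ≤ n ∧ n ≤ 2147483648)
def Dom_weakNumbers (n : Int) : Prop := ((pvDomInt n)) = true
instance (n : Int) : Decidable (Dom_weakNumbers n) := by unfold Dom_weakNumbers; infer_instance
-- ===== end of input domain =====

-- B replaces A's O(n^2) trial division and O(n^2) predecessor scan by a multiples
-- sieve plus one pass over a frequency dict with a running (max, count) pair (faster).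

-- ===== PORT A =====
def weakNumbers (n : Int) : List Int :=
  let divisors0 := (PySem.List.pyRange 0 (n + 2) 1).map (fun _ => (2 : Int))
  let divisors1 := PySem.List.pySetD divisors0 1 1
  let divisors := (PySem.List.pyRange 2 (n + 1) 1).foldl (fun d i =>
      (PySem.List.pyRange 2 i 1).foldl (fun d j =>
        if PySem.Int.mod i j == 0 then
          PySem.List.pySetD d i (PySem.List.pyGetD d i 0 + 1)
        else d) d) divisors1
  let weaknesses := (PySem.List.pyRange 1 (n + 1) 1).foldl (fun ws i =>
      let more := (PySem.List.pyRange 1 i 1).foldl (fun acc j =>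
          if PySem.List.pyGetD divisors i 0 < PySem.List.pyGetD divisors j 0 then acc + 1
          else acc) (0 : Int)
      ws ++ [more]) []
  let weakest := (PySem.List.max? weaknesses (fun x => x)).getD 0
  let times := (PySem.List.count weaknesses weakest : Int)
  [weakest, times]

-- ===== PORT B =====
def weakNumbers_alt (n : Int) : List Int :=
  let cnt0 := PySem.List.pyRepeat [(1 : Int)] (n + 1)
  let cnt := (PySem.List.pyRange 2 (n + 1) 1).foldl (fun c j =>
      (PySem.List.pyRange j (n + 1) j).foldl (fun c m =>
        PySem.List.pySetD c m (PySem.List.pyGetD c m 0 + 1)) c) cnt0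
  let final := (PySem.List.pyRange 1 (n + 1) 1).foldl (fun s i =>
      let w := ((s.1.items.filter (fun p => decide (PySem.List.pyGetD cnt i 0 < p.1))).map
          (fun p => p.2)).sum
      let bt := if w > s.2.1 then (w, (1 : Int))
                else if w == s.2.1 then (s.2.1, s.2.2 + 1) else (s.2.1, s.2.2)
      (s.1.insert (PySem.List.pyGetD cnt i 0) (s.1.getD (PySem.List.pyGetD cnt i 0) 0 + 1), bt))
    ((PySem.Dict.empty : PySem.Dict Int Int), ((-1 : Int), (0 : Int)))
  [final.2.1, final.2.2]

-- ===== PRECONDITION & SPEC =====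
-- Pre_ excludes n ≤ 0, on which A raises (ValueError from max([]) at n = 0, IndexError for n < 0).
def Pre_weakNumbers (n : Int) : Prop := 1 ≤ n
instance (n : Int) : Decidable (Pre_weakNumbers n) := by unfold Pre_weakNumbers; infer_instance
def pvWitness_weakNumbers : Int := (3)

def Spec_weakNumbers (n : Int) (out : List Int) : Prop := out = weakNumbers_alt n
instance (n : Int) (out : List Int) : Decidable (Spec_weakNumbers n out) := by unfold Spec_weakNumbers; infer_instance

-- ===== CLAIM (what is proved, stated in full; the proofs are below) =====
def Claim_equal_weakNumbers : Prop := ∀ (n : Int), Dom_weakNumbers n → Pre_weakNumbers n → Spec_weakNumbers n (weakNumbers n)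

-- ===== LEMMAS AND PROOFS =====

lemma getD_setD_int (xs : List Int) (i k v : Int) (h0 : 0 ≤ i) (h : i < (xs.length : Int))
    (hk0 : 0 ≤ k) :
    PySem.List.pyGetD (PySem.List.pySetD xs i v) k 0 =
      if k = i then v else PySem.List.pyGetD xs k 0 := by
  have hi : i = ((i.toNat : Nat) : Int) := (Int.toNat_of_nonneg h0).symm
  have hk : k = ((k.toNat : Nat) : Int) := (Int.toNat_of_nonneg hk0).symm
  rw [hi, hk, PySem.List.pyGetD_pySetD_natCast xs i.toNat k.toNat v 0 (by omega)]
  by_cases hh : k.toNat = i.toNat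
  · simp [hh]
  · rw [if_neg hh, if_neg (by omega : ¬ ((k.toNat:Nat):Int) = ((i.toNat:Nat):Int))]

lemma innerA_getD (i : Int) (h0 : 0 ≤ i) :
    ∀ (js : List Int) (d : List Int), i < (d.length : Int) →
      ∀ k, 0 ≤ k → k < (d.length : Int) →
      PySem.List.pyGetD (js.foldl (fun d j =>
        if PySem.Int.mod i j == 0 then
          PySem.List.pySetD d i (PySem.List.pyGetD d i 0 + 1) else d) d) k 0 =
      PySem.List.pyGetD d k 0 +
        (if k = i then (js.countP (fun j => PySem.Int.mod i j == 0) : Int) else 0) := by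
  intro js
  induction js with
  | nil => intro d _ k _ _; simp
  | cons j t ih =>
    intro d hd k hk0 hk
    rw [List.foldl_cons, List.countP_cons]
    by_cases hj : PySem.Int.mod i j == 0
    · rw [if_pos hj]
      rw [ih (PySem.List.pySetD d i (PySem.List.pyGetD d i 0 + 1))
          (by rw [PySem.List.length_pySetD]; exact hd) k hk0
          (by rw [PySem.List.length_pySetD]; exact hk)]
      rw [getD_setD_int d i k _ h0 hd hk0]
      by_cases hki : k = i
      · simp [hki, hj]; ring
      · simp [hki]
    · rw [if_neg hj]
      rw [ih d hd k hk0 hk]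
      simp at hj
      simp [hj]

lemma foldl_len_pres {β : Type} (f : List Int → β → List Int)
    (h : ∀ d x, (f d x).length = d.length) :
    ∀ (l : List β) (d : List Int), (l.foldl f d).length = d.length := by
  intro l
  induction l with
  | nil => intro d; rfl
  | cons x t ih => intro d; simpa [List.foldl_cons, h] using ih (f d x)

lemma innerA_len (i : Int) (js : List Int) (d : List Int) :
    (js.foldl (fun d j =>
      if PySem.Int.mod i j == 0 then
        PySem.List.pySetD d i (PySem.List.pyGetD d i 0 + 1) else d) d).length = d.length := by
  apply foldl_len_pres
  intro d j
  by_cases hj : PySem.Int.mod i j == 0 <;> simp [hj, PySem.List.length_pySetD]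

lemma outerA_getD :
    ∀ (is : List Int) (d : List Int), is.Nodup →
      (∀ i ∈ is, 0 ≤ i ∧ i < (d.length : Int)) →
      ∀ k, 0 ≤ k → k < (d.length : Int) →
      PySem.List.pyGetD (is.foldl (fun d i =>
        (PySem.List.pyRange 2 i 1).foldl (fun d j =>
          if PySem.Int.mod i j == 0 then
            PySem.List.pySetD d i (PySem.List.pyGetD d i 0 + 1) else d) d) d) k 0 =
      PySem.List.pyGetD d k 0 +
        (if k ∈ is then ((PySem.List.pyRange 2 k 1).countP (fun j => PySem.Int.mod k j == 0) : Int)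
         else 0) := by
  intro is
  induction is with
  | nil => intro d _ _ k _ _; simp
  | cons i t ih =>
    intro d hnd hb k hk0 hk
    have hi := hb i (by simp)
    rw [List.foldl_cons]
    set d' := (PySem.List.pyRange 2 i 1).foldl (fun d j =>
          if PySem.Int.mod i j == 0 then
            PySem.List.pySetD d i (PySem.List.pyGetD d i 0 + 1) else d) d with hd'
    have hlen : d'.length = d.length := innerA_len i _ d
    rw [ih d' (hnd.of_cons)
        (fun x hx => by rw [hlen]; exact hb x (by simp [hx])) k hk0 (by rw [hlen]; exact hk)]
    rw [hd', innerA_getD i hi.1 _ d hi.2 k hk0 hk]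
    by_cases hki : k = i
    · subst hki
      have hkt : k ∉ t := (List.nodup_cons.mp hnd).1
      rw [if_pos rfl, if_neg hkt, if_pos (List.mem_cons_self)]
      ring
    · rw [if_neg hki]
      by_cases hkt : k ∈ t
      · rw [if_pos hkt, if_pos (List.mem_cons_of_mem _ hkt)]; ring
      · rw [if_neg hkt, if_neg (by simp [hki, hkt])]; ring

lemma incrList_getD :
    ∀ (ms : List Int) (c : List Int),
      (∀ m ∈ ms, 0 ≤ m ∧ m < (c.length : Int)) →
      ∀ k, 0 ≤ k → k < (c.length : Int) →
      PySem.List.pyGetD (ms.foldl (fun c m =>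
        PySem.List.pySetD c m (PySem.List.pyGetD c m 0 + 1)) c) k 0 =
      PySem.List.pyGetD c k 0 + (ms.count k : Int) := by
  intro ms
  induction ms with
  | nil => intro c _ k _ _; simp
  | cons m t ih =>
    intro c hb k hk0 hk
    rw [List.foldl_cons, List.count_cons]
    have hm := hb m (by simp)
    rw [ih (PySem.List.pySetD c m (PySem.List.pyGetD c m 0 + 1))
        (fun x hx => by rw [PySem.List.length_pySetD]; exact hb x (by simp [hx])) k hk0
        (by rw [PySem.List.length_pySetD]; exact hk)]
    rw [getD_setD_int c m k _ hm.1 hm.2 hk0]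
    by_cases hkm : k = m
    · simp [hkm]; ring
    · simp [hkm, Ne.symm hkm]

lemma sieveB_getD (N : Int) :
    ∀ (js : List Int) (c : List Int), (∀ j ∈ js, 0 < j) → N ≤ (c.length : Int) →
      ∀ k, 0 ≤ k → k < (c.length : Int) →
      PySem.List.pyGetD (js.foldl (fun c j =>
        (PySem.List.pyRange j N j).foldl (fun c m =>
          PySem.List.pySetD c m (PySem.List.pyGetD c m 0 + 1)) c) c) k 0 =
      PySem.List.pyGetD c k 0 +
        (js.countP (fun j => decide (k ∈ PySem.List.pyRange j N j)) : Int) := by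
  intro js
  induction js with
  | nil => intro c _ _ k _ _; simp
  | cons j t ih =>
    intro c hpos hN k hk0 hk
    have hj := hpos j (by simp)
    rw [List.foldl_cons, List.countP_cons]
    set c' := (PySem.List.pyRange j N j).foldl (fun c m =>
          PySem.List.pySetD c m (PySem.List.pyGetD c m 0 + 1)) c with hc'
    have hlen : c'.length = c.length :=
      foldl_len_pres _ (fun d m => PySem.List.length_pySetD _ _ _) _ _
    rw [ih c' (fun x hx => hpos x (by simp [hx])) (by rw [hlen]; exact hN) k hk0
        (by rw [hlen]; exact hk)]
    rw [hc', incrList_getD _ c (fun m hm => by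
        rcases (PySem.List.mem_pyRange_iff_of_pos hj m).mp hm with ⟨h1, h2, _⟩
        exact ⟨by omega, by omega⟩) k hk0 hk]
    -- count k of a nodup range is the 0/1 membership indicator
    have hnd : (PySem.List.pyRange j N j).Nodup := by
      rw [PySem.List.pyRange_of_pos _ _ hj]
      apply List.Nodup.map _ (List.nodup_range)
      intro a b hab
      have h2 : (j : Int) * a = j * b := by linarith
      have h3 : (a : Int) = b := mul_left_cancel₀ (by omega : (j : Int) ≠ 0) h2
      exact_mod_cast h3
    by_cases hmem : k ∈ PySem.List.pyRange j N j
    · rw [List.count_eq_one_of_mem hnd hmem]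
      simp [hmem]
      push_cast
      ring
    · rw [List.count_eq_zero_of_not_mem hmem]
      simp [hmem]


def tau (k : Int) : Int :=
  if k = 1 then 1 else 2 + ((PySem.List.pyRange 2 k 1).countP (fun j => PySem.Int.mod k j == 0) : Int)

lemma divisorsA_eq (n : Int) (hn : 1 ≤ n) (k : Int) (hk1 : 1 ≤ k) (hkn : k ≤ n) :
    PySem.List.pyGetD
      ((PySem.List.pyRange 2 (n + 1) 1).foldl (fun d i =>
        (PySem.List.pyRange 2 i 1).foldl (fun d j =>
          if PySem.Int.mod i j == 0 then
            PySem.List.pySetD d i (PySem.List.pyGetD d i 0 + 1) else d) d)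
        (PySem.List.pySetD ((PySem.List.pyRange 0 (n + 2) 1).map (fun _ => (2 : Int))) 1 1)) k 0
    = tau k := by
  set base := PySem.List.pySetD ((PySem.List.pyRange 0 (n + 2) 1).map (fun _ => (2 : Int))) 1 1
    with hbase
  have hlen : (base.length : Int) = n + 2 := by
    rw [hbase, PySem.List.length_pySetD, List.length_map, PySem.List.length_pyRange_one]
    omega
  have hbk : ∀ m : Int, 0 ≤ m → m < n + 2 →
      PySem.List.pyGetD base m 0 = if m = 1 then 1 else 2 := by
    intro m hm0 hm2
    rw [hbase]
    rw [getD_setD_int _ 1 m 1 (by omega) (by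
      rw [PySem.List.length_pySetD] at hlen
      omega) hm0]
    by_cases hm1 : m = 1
    · simp [hm1]
    · rw [if_neg hm1, if_neg hm1,
        PySem.List.pyGetD_map_pyRange_of_nonneg (fun _ => (2:Int)) (n+2) m 0 hm0 hm2]
  rw [outerA_getD _ base (PySem.List.nodup_pyRange_one 2 (n+1))
      (fun i hi => by
        rw [PySem.List.mem_pyRange_one] at hi
        exact ⟨by omega, by omega⟩)
      k (by omega) (by omega)]
  rw [hbk k (by omega) (by omega)]
  by_cases hk : k = 1
  · have : k ∉ PySem.List.pyRange 2 (n+1) 1 := by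
      rw [PySem.List.mem_pyRange_one]; omega
    simp [hk, tau]
  · have hmem : k ∈ PySem.List.pyRange 2 (n+1) 1 := by
      rw [PySem.List.mem_pyRange_one]; omega
    rw [if_neg hk, if_pos hmem, tau, if_neg hk]

lemma cntB_eq (n : Int) (hn : 1 ≤ n) (k : Int) (hk1 : 1 ≤ k) (hkn : k ≤ n) :
    PySem.List.pyGetD
      ((PySem.List.pyRange 2 (n + 1) 1).foldl (fun c j =>
        (PySem.List.pyRange j (n + 1) j).foldl (fun c m =>
          PySem.List.pySetD c m (PySem.List.pyGetD c m 0 + 1)) c)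
        (PySem.List.pyRepeat [(1 : Int)] (n + 1))) k 0
    = tau k := by
  have hlen : ((PySem.List.pyRepeat [(1:Int)] (n+1)).length : Int) = n + 1 := by
    rw [PySem.List.pyRepeat_singleton, List.length_replicate]; omega
  rw [sieveB_getD (n+1) _ _
      (fun j hj => by rw [PySem.List.mem_pyRange_one] at hj; omega)
      (by omega) k (by omega) (by omega)]
  have hbase : PySem.List.pyGetD (PySem.List.pyRepeat [(1:Int)] (n+1)) k 0 = 1 := by
    rw [PySem.List.pyRepeat_singleton,
      PySem.List.pyGetD_eq_getElem (List.replicate (n+1).toNat (1:Int)) 0 (by omega)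
        (by rw [List.length_replicate]; omega),
      List.getElem_replicate]
  rw [hbase]
  by_cases hk : k = 1
  · subst hk
    have : (PySem.List.pyRange 2 (n+1) 1).countP
        (fun j => decide ((1:Int) ∈ PySem.List.pyRange j (n+1) j)) = 0 := by
      apply List.countP_eq_zero.mpr
      intro j hj
      rw [PySem.List.mem_pyRange_one] at hj
      simp only [decide_eq_true_eq]
      intro hc
      rw [PySem.List.mem_pyRange_iff_of_pos (by omega)] at hc
      omega
    rw [this]
    simp [tau]
  · -- 2 ≤ k: split the range at k+1 and peel off k
    have h2k : (2:Int) ≤ k := by omega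
    rw [PySem.List.pyRange_one_append 2 (k+1) (n+1) (by omega) (by omega),
      List.countP_append,
      PySem.List.pyRange_one_succ_right h2k, List.countP_append]
    have hk_self : ([k].countP (fun j => decide (k ∈ PySem.List.pyRange j (n+1) j))) = 1 := by
      simp only [List.countP_cons, List.countP_nil]
      have : k ∈ PySem.List.pyRange k (n+1) k := by
        rw [PySem.List.mem_pyRange_iff_of_pos (by omega)]
        exact ⟨le_refl k, by omega, by simp⟩
      simp [this]
    have htail : (PySem.List.pyRange (k+1) (n+1) 1).countP
        (fun j => decide (k ∈ PySem.List.pyRange j (n+1) j)) = 0 := by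
      apply List.countP_eq_zero.mpr
      intro j hj
      rw [PySem.List.mem_pyRange_one] at hj
      simp only [decide_eq_true_eq]
      intro hc
      rw [PySem.List.mem_pyRange_iff_of_pos (by omega)] at hc
      omega
    have hmain : (PySem.List.pyRange 2 k 1).countP
        (fun j => decide (k ∈ PySem.List.pyRange j (n+1) j)) =
        (PySem.List.pyRange 2 k 1).countP (fun j => PySem.Int.mod k j == 0) := by
      apply List.countP_congr
      intro j hj
      rw [PySem.List.mem_pyRange_one] at hj
      simp only [decide_eq_true_eq, beq_iff_eq]
      rw [PySem.List.mem_pyRange_iff_of_pos (by omega), PySem.Int.mod_eq_zero_iff_dvd]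
      constructor
      · rintro ⟨-, -, hd⟩
        have : j ∣ (k - j) + j := Dvd.dvd.add hd (dvd_refl j)
        simpa using this
      · intro hd
        exact ⟨by omega, by omega, (Int.dvd_sub hd (dvd_refl j))⟩
    rw [hk_self, htail, hmain, tau, if_neg hk]
    push_cast
    ring

def wA (k : Int) : Int := ((PySem.List.pyRange 1 k 1).countP (fun j => decide (tau k < tau j)) : Int)

def btStep (s : Int × Int) (w : Int) : Int × Int :=
  if w > s.1 then (w, 1) else if w == s.1 then (s.1, s.2 + 1) else (s.1, s.2)

def wvals (g : Int → Int) : List Int → List Int → List Int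
  | _, [] => []
  | pre, i :: t => (((pre.map g).countP (fun x => decide (g i < x)) : Int)) :: wvals g (pre ++ [i]) t

lemma sumItems_counter (xs : List Int) (t : Int) :
    (((PySem.Dict.counter xs).items.filter (fun p => decide (t < p.1))).map
      (fun p => p.2)).sum = (xs.countP (fun c => decide (t < c)) : Int) := by
  rw [PySem.Dict.items_counter, List.filter_map, List.map_map]
  show (((PySem.Set.ofList xs).filter (fun k => decide (t < k))).map
      (fun k => (List.count k xs : Int))).sum = _
  have hperm : (PySem.Set.ofList xs).Perm xs.dedup := by
    rw [List.perm_ext_iff_of_nodup (PySem.Set.nodup_ofList xs) (List.nodup_dedup xs)]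
    intro a
    rw [PySem.Set.mem_ofList, List.mem_dedup]
  rw [((hperm.filter (fun k => decide (t < k))).map (fun k => (List.count k xs : Int))).sum_eq]
  rw [show (fun k => (List.count k xs : Int)) = (Nat.cast ∘ fun k => List.count k xs) from rfl,
    ← List.map_map, ← Nat.cast_list_sum, List.sum_map_count_dedup_filter_eq_countP]

lemma counter_snoc (ys : List Int) (x : Int) :
    (PySem.Dict.counter ys).insert x ((PySem.Dict.counter ys).getD x 0 + 1) =
      PySem.Dict.counter (ys ++ [x]) := by
  rw [← PySem.Dict.foldl_insert_getD_add_one_eq_counter (ys ++ [x]), List.foldl_append,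
    PySem.Dict.foldl_insert_getD_add_one_eq_counter ys]
  rfl

lemma passB (g : Int → Int) :
    ∀ (l pre : List Int) (B T : Int),
      l.foldl (fun s i =>
        let w := ((s.1.items.filter (fun p => decide (g i < p.1))).map (fun p => p.2)).sum
        let bt := if w > s.2.1 then (w, (1 : Int))
                  else if w == s.2.1 then (s.2.1, s.2.2 + 1) else (s.2.1, s.2.2)
        (s.1.insert (g i) (s.1.getD (g i) 0 + 1), bt))
        (PySem.Dict.counter (pre.map g), (B, T))
      = (PySem.Dict.counter ((pre ++ l).map g), (wvals g pre l).foldl btStep (B, T)) := by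
  intro l
  induction l with
  | nil => intro pre B T; simp [wvals]
  | cons i t ih =>
    intro pre B T
    rw [List.foldl_cons]
    have hw : ((((PySem.Dict.counter (pre.map g)).items.filter
        (fun p => decide (g i < p.1))).map (fun p => p.2)).sum) =
        ((pre.map g).countP (fun x => decide (g i < x)) : Int) := sumItems_counter _ _
    simp only [hw, counter_snoc]
    have : (PySem.Dict.counter ((pre ++ [i]).map g),
        (btStep (B, T) (((pre.map g).countP (fun x => decide (g i < x)) : Int)))) =
        (PySem.Dict.counter ((pre ++ [i]).map g),
          ((btStep (B, T) (((pre.map g).countP (fun x => decide (g i < x)) : Int))).1,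
           (btStep (B, T) (((pre.map g).countP (fun x => decide (g i < x)) : Int))).2)) := by
      simp
    rw [show (wvals g pre (i :: t)) =
        (((pre.map g).countP (fun x => decide (g i < x)) : Int)) :: wvals g (pre ++ [i]) t
      from rfl, List.foldl_cons]
    have happ : pre ++ i :: t = (pre ++ [i]) ++ t := by simp
    rw [happ]
    have := ih (pre ++ [i])
      (btStep (B, T) (((pre.map g).countP (fun x => decide (g i < x)) : Int))).1
      (btStep (B, T) (((pre.map g).countP (fun x => decide (g i < x)) : Int))).2
    rw [← this]
    simp only [List.map_append, List.map_cons, List.map_nil, Prod.mk.eta]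
    rfl

lemma btFold_spec :
    ∀ (ws pre : List Int),
      ws.foldl btStep (pre.foldl max (-1), (pre.count (pre.foldl max (-1)) : Int)) =
      ((pre ++ ws).foldl max (-1), ((pre ++ ws).count ((pre ++ ws).foldl max (-1)) : Int)) := by
  intro ws
  induction ws with
  | nil => intro pre; simp
  | cons w t ih =>
    intro pre
    rw [List.foldl_cons]
    have hstep : btStep (pre.foldl max (-1), (pre.count (pre.foldl max (-1)) : Int)) w =
        ((pre ++ [w]).foldl max (-1), ((pre ++ [w]).count ((pre ++ [w]).foldl max (-1)) : Int)) := by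
      set M := pre.foldl max (-1) with hM
      have hMmax : (pre ++ [w]).foldl max (-1) = max M w := by
        rw [List.foldl_append]; rfl
      rw [btStep, hMmax]
      by_cases h1 : w > M
      · rw [if_pos h1, max_eq_right (le_of_lt h1)]
        have hnot : w ∉ pre := by
          intro hmem
          exact absurd ((PySem.List.le_foldl_max pre (-1)).2 w hmem) (by omega)
        rw [List.count_append, List.count_eq_zero_of_not_mem hnot]
        simp
      · rw [if_neg h1]
        have hle : w ≤ M := by omega
        rw [max_eq_left hle]
        by_cases h2 : w = M
        · rw [if_pos (by simpa using h2), List.count_append, h2]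
          simp
        · rw [if_neg (by simpa using h2), List.count_append,
            List.count_eq_zero_of_not_mem (by simp; omega : M ∉ [w])]
          simp
    rw [hstep, ih (pre ++ [w])]
    simp

-- wvals over a range of successive integers is the map of wA
lemma wvals_range : ∀ (m : Nat) (a b : Int), 1 ≤ a → (b - a).toNat = m →
    wvals tau (PySem.List.pyRange 1 a 1) (PySem.List.pyRange a b 1) =
      (PySem.List.pyRange a b 1).map wA := by
  intro m
  induction m with
  | zero =>
    intro a b ha hm
    rw [PySem.List.pyRange_one_eq_nil (a := a) (b := b) (by omega)]
    rfl
  | succ m ih =>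
    intro a b ha hm
    rw [PySem.List.pyRange_one_cons (a := a) (b := b) (by omega)]
    show (((PySem.List.pyRange 1 a 1).map tau).countP (fun x => decide (tau a < x)) : Int) ::
        wvals tau (PySem.List.pyRange 1 a 1 ++ [a]) (PySem.List.pyRange (a+1) b 1) = _
    rw [← PySem.List.pyRange_one_succ_right ha, List.map_cons]
    congr 1
    · rw [List.countP_map]
      rfl
    · exact ih (a+1) b (by omega) (by omega)

lemma weaknessesA_eq (n : Int) (D : List Int)
    (hD : ∀ i, 1 ≤ i → i ≤ n → PySem.List.pyGetD D i 0 = tau i) :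
    (PySem.List.pyRange 1 (n + 1) 1).foldl (fun ws i =>
      ws ++ [(PySem.List.pyRange 1 i 1).foldl (fun acc j =>
        if PySem.List.pyGetD D i 0 < PySem.List.pyGetD D j 0 then acc + 1 else acc) (0:Int)]) []
    = (PySem.List.pyRange 1 (n+1) 1).map wA := by
  rw [PySem.List.foldl_append_singleton_eq_map, List.nil_append]
  apply List.map_congr_left
  intro i hi
  rw [PySem.List.mem_pyRange_one] at hi
  rw [PySem.List.foldl_ite_add_one
    (p := fun j => PySem.List.pyGetD D i 0 < PySem.List.pyGetD D j 0)]
  rw [List.countP_congr (q := fun j => decide (tau i < tau j)) (by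
    intro j hj
    rw [PySem.List.mem_pyRange_one] at hj
    rw [hD i (by omega) (by omega), hD j (by omega) (by omega)])]
  simp [wA]

lemma passB_total (n : Int) (hn : 1 ≤ n) (C : List Int)
    (hC : ∀ i, 1 ≤ i → i ≤ n → PySem.List.pyGetD C i 0 = tau i) :
    (PySem.List.pyRange 1 (n + 1) 1).foldl (fun s i =>
      let w := ((s.1.items.filter (fun p => decide (PySem.List.pyGetD C i 0 < p.1))).map
          (fun p => p.2)).sum
      let bt := if w > s.2.1 then (w, (1 : Int))
                else if w == s.2.1 then (s.2.1, s.2.2 + 1) else (s.2.1, s.2.2)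
      (s.1.insert (PySem.List.pyGetD C i 0) (s.1.getD (PySem.List.pyGetD C i 0) 0 + 1), bt))
      ((PySem.Dict.empty : PySem.Dict Int Int), ((-1 : Int), (0 : Int)))
    = (PySem.Dict.counter ((PySem.List.pyRange 1 (n+1) 1).map tau),
       (((PySem.List.pyRange 1 (n+1) 1).map wA).foldl max (-1),
        ((((PySem.List.pyRange 1 (n+1) 1).map wA).count
          (((PySem.List.pyRange 1 (n+1) 1).map wA).foldl max (-1)) : Nat) : Int))) := by
  have hcongr := PySem.List.foldl_congr_mem (PySem.List.pyRange 1 (n+1) 1)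
    (fun (s : PySem.Dict Int Int × Int × Int) i =>
      let w := ((s.1.items.filter (fun p => decide (PySem.List.pyGetD C i 0 < p.1))).map
          (fun p => p.2)).sum
      let bt := if w > s.2.1 then (w, (1 : Int))
                else if w == s.2.1 then (s.2.1, s.2.2 + 1) else (s.2.1, s.2.2)
      (s.1.insert (PySem.List.pyGetD C i 0) (s.1.getD (PySem.List.pyGetD C i 0) 0 + 1), bt))
    (fun (s : PySem.Dict Int Int × Int × Int) i =>
      let w := ((s.1.items.filter (fun p => decide (tau i < p.1))).map (fun p => p.2)).sum
      let bt := if w > s.2.1 then (w, (1 : Int))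
                else if w == s.2.1 then (s.2.1, s.2.2 + 1) else (s.2.1, s.2.2)
      (s.1.insert (tau i) (s.1.getD (tau i) 0 + 1), bt))
    ((PySem.Dict.empty : PySem.Dict Int Int), ((-1 : Int), (0 : Int)))
    (by
      intro acc i hi
      rw [PySem.List.mem_pyRange_one] at hi
      simp only [hC i (by omega) (by omega)])
  rw [hcongr]
  rw [show ((PySem.Dict.empty : PySem.Dict Int Int), ((-1:Int), (0:Int))) =
      (PySem.Dict.counter ((([]:List Int)).map tau), ((-1:Int), (0:Int))) from rfl]
  rw [passB tau]
  rw [List.nil_append]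
  congr 1
  rw [show (([]:List Int)) = PySem.List.pyRange 1 1 1 from
    (PySem.List.pyRange_one_eq_nil (le_refl 1)).symm]
  rw [wvals_range n.toNat 1 (n+1) (le_refl 1) (by omega)]
  have h0 : ((-1:Int), (0:Int)) =
      ((([]:List Int).foldl max (-1)),
       (((([]:List Int).count (([]:List Int).foldl max (-1))) : Nat) : Int)) := rfl
  rw [h0, btFold_spec _ [], List.nil_append]

-- ===== VERDICT (by name: the statement is the Claim_ definition above) =====
theorem weakNumbers_spec : Claim_equal_weakNumbers := by
  intro n _ hpre
  have hn : (1:Int) ≤ n := hpre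
  show weakNumbers n = weakNumbers_alt n
  simp only [weakNumbers, weakNumbers_alt]
  rw [weaknessesA_eq n _ (fun i h1 h2 => divisorsA_eq n hn i h1 h2)]
  rw [passB_total n hn _ (fun i h1 h2 => cntB_eq n hn i h1 h2)]
  set W := (PySem.List.pyRange 1 (n+1) 1).map wA with hW
  have hW1 : W = wA 1 :: (PySem.List.pyRange (1+1) (n+1) 1).map wA := by
    rw [hW, PySem.List.pyRange_one_cons (a := 1) (b := n+1) (by omega), List.map_cons]
  have hwA1 : wA 1 = 0 := by
    simp [wA, PySem.List.pyRange_one_eq_nil (le_refl (1:Int))]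
  have hmax : (PySem.List.max? W (fun x => x)).getD 0 = W.foldl max (-1) := by
    rw [hW1, PySem.List.max?_id_cons, Option.getD_some, List.foldl_cons]
    have : max (-1) (wA 1) = wA 1 := by rw [hwA1]; norm_num
    rw [this]
  rw [hmax]
  rfl
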